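-- pv_equiv track=rewrite | github.com/smruti-hustles/CCC | 17Reverse.py | reverse_odds
-- ===== SOURCE A (Python) =====
-- def reverse_odds(arr):
--     # Extract odd numbers and their positions
--     odds = [num for num in arr if num % 2 != 0]
--     odd_positions = [i for i, num in enumerate(arr) if num % 2 != 0]
--
--     # Reverse the list of odd numbers
--     reversed_odds = odds[::-1]
--
--     # Create a copy of the original array to modify
--     result = arr[:]
--
--     # Place the reversed odd numbers back into their original positions
--     for pos, num in zip(odd_positions, reversed_odds):
--         result[pos] = num
--
--     return result
--
-- arr = [1, 2, 3, 4, 5, 6, 7, 8]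
-- ===== SOURCE B (Python) =====
-- def reverse_odds(arr):
--     # Two converging pointers swapping odd values in place; no auxiliary odds/positions lists.
--     result = list(arr)
--     left, right = 0, len(result) - 1
--     while left < right:
--         if result[left] % 2 == 0:
--             left += 1
--         elif result[right] % 2 == 0:
--             right -= 1
--         else:
--             result[left], result[right] = result[right], result[left]
--             left += 1
--             right -= 1
--     return result
-- ===== Notes on version B (the rewrite author's own statement) =====
-- stated objective: alternative
-- what changed: A extracts the odds and their positions, reverses the odds and scatters them back by index assignment; B keeps two pointers converging from both ends and swaps pairs of odd values in place, using no auxiliary lists.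
import Mathlib
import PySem

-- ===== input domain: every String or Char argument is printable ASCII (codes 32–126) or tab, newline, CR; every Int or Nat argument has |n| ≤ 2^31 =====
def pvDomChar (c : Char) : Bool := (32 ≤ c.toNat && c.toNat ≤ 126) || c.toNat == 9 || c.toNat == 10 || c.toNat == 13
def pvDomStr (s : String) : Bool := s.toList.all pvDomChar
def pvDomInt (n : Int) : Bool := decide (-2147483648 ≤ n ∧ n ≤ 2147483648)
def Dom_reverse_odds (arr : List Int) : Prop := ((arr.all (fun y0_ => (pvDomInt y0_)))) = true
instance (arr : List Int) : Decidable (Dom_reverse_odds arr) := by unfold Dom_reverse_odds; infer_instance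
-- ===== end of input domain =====

-- B replaces A's collect-reverse-and-scatter with two converging pointers that swap odd values in place (objective: alternative; O(1) extra space, not claimed faster).
-- ===== PORT A =====
-- odd test is Python's 'num % 2 != 0' via PySem.Int.mod
def reverse_odds (arr : List Int) : List Int :=
  let odds := arr.filter (fun num => PySem.Int.mod num 2 != 0)
  let odd_positions := (PySem.List.enumerate arr 0).filterMap
    (fun p => if PySem.Int.mod p.2 2 != 0 then some p.1 else none)
  let reversed_odds := (PySem.List.slice? odds none none (-1)).getD []
  let result := PySem.List.slice arr none none
  (odd_positions.zip reversed_odds).foldl (fun r p => PySem.List.pySetD r p.1 p.2) result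

-- ===== PORT B =====
-- the while loop; left/right always stay in range while left < right, so pyGetD's default is unreachable
def revOddsLoop (result : List Int) (left right : Int) : List Int :=
  if left < right then
    if PySem.Int.mod (PySem.List.pyGetD result left 0) 2 == 0 then
      revOddsLoop result (left + 1) right
    else if PySem.Int.mod (PySem.List.pyGetD result right 0) 2 == 0 then
      revOddsLoop result left (right - 1)
    else
      revOddsLoop
        (PySem.List.pySetD (PySem.List.pySetD result left (PySem.List.pyGetD result right 0))
          right (PySem.List.pyGetD result left 0))
        (left + 1) (right - 1)
  else result
termination_by (right - left).toNat
decreasing_by all_goals omega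

-- result = list(arr) is a copy; for immutable Lean lists that is arr itself
def reverse_odds_alt (arr : List Int) : List Int :=
  revOddsLoop arr 0 ((arr.length : Int) - 1)

-- ===== PRECONDITION & SPEC =====
def Spec_reverse_odds (arr : List Int) (out : List Int) : Prop := out = reverse_odds_alt arr
instance (arr : List Int) (out : List Int) : Decidable (Spec_reverse_odds arr out) := by unfold Spec_reverse_odds; infer_instance

-- ===== CLAIM (what is proved, stated in full; the proofs are below) =====
def Claim_equal_reverse_odds : Prop := ∀ (arr : List Int), Dom_reverse_odds arr → Spec_reverse_odds arr (reverse_odds arr)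

-- ===== LEMMAS AND PROOFS =====

-- parity bridges between the ports' Bool tests and the Prop form x % 2 = 1 used in the proofs
theorem oddb_true {x : Int} (h : x % 2 = 1) : (PySem.Int.mod x 2 != 0) = true := by
  simp; omega
theorem oddb_false {x : Int} (h : ¬ x % 2 = 1) : (PySem.Int.mod x 2 != 0) = false := by
  simp; omega
theorem evenb_true {x : Int} (h : ¬ x % 2 = 1) : (PySem.Int.mod x 2 == 0) = true := by
  simp; omega
theorem evenb_false {x : Int} (h : x % 2 = 1) : (PySem.Int.mod x 2 == 0) = false := by
  simp; omega
theorem evenb_not {x : Int} (h : x % 2 = 1) : ¬ ((PySem.Int.mod x 2 == 0) = true) := by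
  rw [evenb_false h]; simp
theorem filter_cons_odd {x : Int} (h : x % 2 = 1) (l : List Int) :
    List.filter (fun y => PySem.Int.mod y 2 != 0) (x :: l)
      = x :: List.filter (fun y => PySem.Int.mod y 2 != 0) l := by
  simp only [List.filter_cons, oddb_true h]; simp
theorem filter_cons_even {x : Int} (h : ¬ x % 2 = 1) (l : List Int) :
    List.filter (fun y => PySem.Int.mod y 2 != 0) (x :: l)
      = List.filter (fun y => PySem.Int.mod y 2 != 0) l := by
  simp only [List.filter_cons, oddb_false h]; simp
theorem filter_single_odd {a : Int} (h : a % 2 = 1) :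
    List.filter (fun x => PySem.Int.mod x 2 != 0) [a] = [a] := by
  rw [filter_cons_odd h]; rfl
theorem filter_single_even {a : Int} (h : ¬ a % 2 = 1) :
    List.filter (fun x => PySem.Int.mod x 2 != 0) [a] = [] := by
  rw [filter_cons_even h]; rfl

-- intermediate reference function: fill each odd slot from the pool vs
def revOddsFeed : List Int → List Int → List Int
  | [], _ => []
  | x :: xs, vs =>
    if PySem.Int.mod x 2 != 0 then
      match vs with
      | v :: vs' => v :: revOddsFeed xs vs'
      | [] => x :: revOddsFeed xs []
    else x :: revOddsFeed xs vs

-- recursive view of B's two-pointer loop acting on the segment between the pointers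
def tpSeg : List Int → List Int
  | [] => []
  | [x] => [x]
  | a :: x :: t =>
    if a % 2 = 1 then
      if (x :: t).getLastD 0 % 2 = 1 then
        (x :: t).getLastD 0 :: tpSeg ((x :: t).dropLast) ++ [a]
      else tpSeg (a :: (x :: t).dropLast) ++ [(x :: t).getLastD 0]
    else a :: tpSeg (x :: t)
termination_by xs => xs.length
decreasing_by all_goals (simp [List.length_dropLast]; try omega)

theorem tpSeg_cons₂ (a x : Int) (t : List Int) : tpSeg (a :: x :: t) =
    if a % 2 = 1 then
      if (x :: t).getLastD 0 % 2 = 1 then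
        (x :: t).getLastD 0 :: tpSeg ((x :: t).dropLast) ++ [a]
      else tpSeg (a :: (x :: t).dropLast) ++ [(x :: t).getLastD 0]
    else a :: tpSeg (x :: t) := by
  rw [tpSeg]

theorem revOddsFeed_nil_pool (xs : List Int) : revOddsFeed xs [] = xs := by
  induction xs with
  | nil => rfl
  | cons x xs ih => simp [revOddsFeed, ih]

theorem set_append_cons (pre : List Int) (x v : Int) (xs : List Int) :
    (pre ++ x :: xs).set pre.length v = pre ++ v :: xs := by
  induction pre with
  | nil => rfl
  | cons p pre ih => simp [ih]

theorem getD_append_cons (pre : List Int) (x d : Int) (xs : List Int) :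
    (pre ++ x :: xs).getD pre.length d = x := by
  induction pre with
  | nil => rfl
  | cons p pre ih => simp [ih]

theorem scatter_eq_feed (xs : List Int) (pre : List Int) (vs : List Int) :
    (((PySem.List.enumerate xs (pre.length : Int)).filterMap
        (fun p => if PySem.Int.mod p.2 2 != 0 then some p.1 else none)).zip vs).foldl
      (fun r p => PySem.List.pySetD r p.1 p.2) (pre ++ xs)
    = pre ++ revOddsFeed xs vs := by
  induction xs generalizing pre vs with
  | nil => simp [PySem.List.enumerate_nil, revOddsFeed]
  | cons x xs ih =>
    rw [PySem.List.enumerate_cons]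
    have hcons : ∀ vs, revOddsFeed (x :: xs) vs =
        if PySem.Int.mod x 2 != 0 then
          match vs with
          | v :: vs' => v :: revOddsFeed xs vs'
          | [] => x :: revOddsFeed xs []
        else x :: revOddsFeed xs vs := fun _ => rfl
    by_cases hodd : PySem.Int.mod x 2 != 0
    · cases vs with
      | nil =>
        simp only [List.filterMap_cons, hodd, if_pos, List.zip_nil_right,
          List.foldl_nil, hcons, revOddsFeed_nil_pool]
      | cons v vs' =>
        simp only [List.filterMap_cons, hodd, if_pos, List.zip_cons_cons, List.foldl_cons]
        have hcast : ((pre.length : Int) + 1) = (((pre ++ [v]).length : Nat) : Int) := by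
          simp
        have hset : PySem.List.pySetD (pre ++ x :: xs) ((pre.length : Nat) : Int) v
            = (pre ++ [v]) ++ xs := by
          rw [PySem.List.pySetD_natCast, set_append_cons]
          simp
        rw [hset, hcast, ih, hcons, if_pos hodd]
        simp
    · rw [List.filterMap_cons_none]
      · have hsplit : pre ++ x :: xs = (pre ++ [x]) ++ xs := by simp
        have hcast : ((pre.length : Int) + 1) = (((pre ++ [x]).length : Nat) : Int) := by
          simp
        rw [hsplit, hcast, ih, hcons, if_neg hodd]
        simp
      · simp only [hodd, if_false, Bool.false_eq_true]

theorem reverse_odds_eq_feed (arr : List Int) :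
    reverse_odds arr = revOddsFeed arr (arr.reverse.filter (fun x => PySem.Int.mod x 2 != 0)) := by
  simp only [reverse_odds, PySem.List.slice?_none_none_neg_one,
    PySem.List.slice_none_none, Option.getD_some]
  rw [← List.filter_reverse]
  have := scatter_eq_feed arr [] (arr.reverse.filter (fun x => PySem.Int.mod x 2 != 0))
  simpa using this

-- feeding past a trailing even element leaves it in place
theorem feed_last_even (ys : List Int) (z : Int) (hz : ¬ z % 2 = 1)
    (vs : List Int) : revOddsFeed (ys ++ [z]) vs = revOddsFeed ys vs ++ [z] := by
  induction ys generalizing vs with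
  | nil => simp [revOddsFeed, hz]
  | cons y ys ih =>
    by_cases hy : y % 2 = 1
    · cases vs with
      | nil => simp [revOddsFeed_nil_pool]
      | cons v vs' => simp [revOddsFeed, hy, ih]
    · simp [revOddsFeed, hy, ih]

-- with a pool exactly matching the odds of mid, a trailing odd element takes the pool's last entry
theorem feed_last_odd (mid : List Int) (b a : Int) (hb : b % 2 = 1)
    (ws : List Int) (hlen : ws.length = (mid.filter (fun x => PySem.Int.mod x 2 != 0)).length) :
    revOddsFeed (mid ++ [b]) (ws ++ [a]) = revOddsFeed mid ws ++ [a] := by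
  induction mid generalizing ws with
  | nil =>
    have : ws = [] := by simpa using hlen
    subst this
    simp [revOddsFeed, hb]
  | cons x mid ih =>
    by_cases hx : x % 2 = 1
    · cases ws with
      | nil =>
        rw [filter_cons_odd hx] at hlen
        simp at hlen
      | cons w ws' =>
        rw [filter_cons_odd hx] at hlen
        simp only [List.length_cons, Nat.add_right_cancel_iff] at hlen
        simp [revOddsFeed, hx, ih ws' hlen]
    · rw [filter_cons_even hx] at hlen
      simp [revOddsFeed, hx, ih ws hlen]

theorem tpSeg_eq_feed (n : Nat) : ∀ (xs : List Int), xs.length = n →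
    tpSeg xs = revOddsFeed xs (xs.reverse.filter (fun x => PySem.Int.mod x 2 != 0)) := by
  induction n using Nat.strong_induction_on with
  | _ n ih =>
    intro xs hn
    match xs with
    | [] => simp [tpSeg, revOddsFeed]
    | [x] =>
      by_cases hx : x % 2 = 1
      · simp [tpSeg, revOddsFeed, hx]
      · simp [tpSeg, revOddsFeed, hx]
    | a :: x :: t =>
      obtain ⟨mid, b, hmb⟩ : ∃ mid b, x :: t = mid ++ [b] :=
        ⟨(x :: t).dropLast, (x :: t).getLast (by simp), ((x :: t).dropLast_append_getLast (by simp)).symm⟩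
      have hb_def : (x :: t).getLastD 0 = b := by rw [hmb]; simp
      have hmid_def : (x :: t).dropLast = mid := by rw [hmb]; simp
      have hmidlen : mid.length = t.length := by
        have := congrArg List.length hmb; simp at this; omega
      have hn' : t.length + 2 = n := by simpa using hn
      have hrev : (a :: x :: t).reverse = b :: mid.reverse ++ [a] := by
        rw [hmb]; simp
      have htp := tpSeg_cons₂ a x t
      rw [hb_def, hmid_def] at htp
      by_cases ha : a % 2 = 1
      · by_cases hbo : b % 2 = 1
        · -- both ends odd: they swap
          rw [htp, if_pos ha, if_pos hbo]
          have hfilt : (a :: x :: t).reverse.filter (fun x => PySem.Int.mod x 2 != 0)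
              = b :: (mid.reverse.filter (fun x => PySem.Int.mod x 2 != 0)) ++ [a] := by
            rw [hrev, List.cons_append, filter_cons_odd hbo, List.filter_append, filter_single_odd ha]
            rfl
          have hxs : a :: x :: t = a :: (mid ++ [b]) := by rw [hmb]
          rw [hfilt, hxs]
          have h1 : revOddsFeed (a :: (mid ++ [b]))
              (b :: (mid.reverse.filter (fun x => PySem.Int.mod x 2 != 0)) ++ [a])
              = b :: revOddsFeed (mid ++ [b])
                  ((mid.reverse.filter (fun x => PySem.Int.mod x 2 != 0)) ++ [a]) := by
            simp [revOddsFeed, ha]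
          rw [h1, feed_last_odd mid b a hbo _ (by simp)]
          rw [ih mid.length (by omega) mid rfl]
          simp
        · -- last even: it stays, recurse on a :: mid
          rw [htp, if_pos ha, if_neg hbo]
          have hfilt : (a :: x :: t).reverse.filter (fun x => PySem.Int.mod x 2 != 0)
              = (a :: mid).reverse.filter (fun x => PySem.Int.mod x 2 != 0) := by
            rw [hrev, List.cons_append, filter_cons_even hbo,
              show (a :: mid).reverse = mid.reverse ++ [a] by simp]
          rw [hfilt, show a :: x :: t = (a :: mid) ++ [b] by rw [hmb, List.cons_append],
            feed_last_even (a :: mid) b hbo]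
          rw [ih (mid.length + 1) (by omega) (a :: mid) (by simp)]
      · -- head even: it stays, recurse on the tail
        rw [htp, if_neg ha]
        rw [ih (t.length + 1) (by omega) (x :: t) (by simp)]
        have hfeq : (a :: x :: t).reverse.filter (fun x => PySem.Int.mod x 2 != 0)
            = (x :: t).reverse.filter (fun x => PySem.Int.mod x 2 != 0) := by
          rw [List.reverse_cons, List.filter_append, filter_single_even ha, List.append_nil]
        rw [hfeq]
        have : revOddsFeed (a :: x :: t) ((x :: t).reverse.filter (fun x => PySem.Int.mod x 2 != 0))
            = a :: revOddsFeed (x :: t) ((x :: t).reverse.filter (fun x => PySem.Int.mod x 2 != 0)) := by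
          simp [revOddsFeed, ha]
        rw [this]

-- B's index loop on pre ++ seg ++ suf with the pointers bracketing seg computes tpSeg on seg
theorem revOddsLoop_eq_tpSeg (n : Nat) : ∀ (seg : List Int), seg.length = n →
    ∀ (pre suf : List Int),
    revOddsLoop (pre ++ seg ++ suf) ((pre.length : Int)) ((pre.length : Int) + (seg.length : Int) - 1)
      = pre ++ tpSeg seg ++ suf := by
  induction n using Nat.strong_induction_on with
  | _ n ih =>
    intro seg hn pre suf
    match seg with
    | [] =>
      rw [revOddsLoop, if_neg (by simp)]
      simp [tpSeg]
    | [x] =>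
      rw [revOddsLoop, if_neg (by simp)]
      simp [tpSeg]
    | a :: x :: t =>
      obtain ⟨mid, b, hmb⟩ : ∃ mid b, x :: t = mid ++ [b] :=
        ⟨(x :: t).dropLast, (x :: t).getLast (by simp), ((x :: t).dropLast_append_getLast (by simp)).symm⟩
      have hb_def : (x :: t).getLastD 0 = b := by rw [hmb]; simp
      have hmid_def : (x :: t).dropLast = mid := by rw [hmb]; simp
      have hmidlen : mid.length = t.length := by
        have := congrArg List.length hmb; simp at this; omega
      have hn' : t.length + 2 = n := by simpa using hn
      have htp := tpSeg_cons₂ a x t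
      rw [hb_def, hmid_def] at htp
      -- the two reads
      have hgetl : PySem.List.pyGetD (pre ++ (a :: x :: t) ++ suf) ((pre.length : Int)) 0 = a := by
        rw [show pre ++ (a :: x :: t) ++ suf = pre ++ a :: (x :: t ++ suf) by simp,
          PySem.List.pyGetD_natCast, getD_append_cons]
      have hsplitr : pre ++ (a :: x :: t) ++ suf = (pre ++ a :: mid) ++ b :: suf := by
        rw [hmb]; simp
      have hrcast : (pre.length : Int) + ((a :: x :: t).length : Int) - 1
          = (((pre ++ a :: mid).length : Nat) : Int) := by
        simp [hmidlen]; ring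
      have hgetr : PySem.List.pyGetD (pre ++ (a :: x :: t) ++ suf)
          ((pre.length : Int) + ((a :: x :: t).length : Int) - 1) 0 = b := by
        rw [hrcast, hsplitr, PySem.List.pyGetD_natCast, getD_append_cons]
      rw [revOddsLoop, if_pos (by simp; omega), hgetl, hgetr]
      by_cases ha : a % 2 = 1
      · rw [if_neg (evenb_not ha)]
        by_cases hbo : b % 2 = 1
        · -- both odd: swap and recurse on mid
          rw [if_neg (evenb_not hbo)]
          have hset1 : PySem.List.pySetD (pre ++ (a :: x :: t) ++ suf) ((pre.length : Int)) b
              = (pre ++ b :: mid) ++ b :: suf := by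
            rw [show pre ++ (a :: x :: t) ++ suf = pre ++ a :: (x :: t ++ suf) by simp,
              PySem.List.pySetD_natCast, set_append_cons, hmb]
            simp
          have hset2 : PySem.List.pySetD ((pre ++ b :: mid) ++ b :: suf)
              ((pre.length : Int) + ((a :: x :: t).length : Int) - 1) a
              = (pre ++ [b]) ++ mid ++ (a :: suf) := by
            rw [hrcast, PySem.List.pySetD_natCast,
              show (pre ++ a :: mid).length = (pre ++ b :: mid).length by simp,
              show pre ++ b :: mid ++ b :: suf = (pre ++ b :: mid) ++ b :: suf by simp,
              set_append_cons]
            simp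
          rw [hset1, hset2]
          have hl' : (pre.length : Int) + 1 = (((pre ++ [b]).length : Nat) : Int) := by simp
          have hr' : (pre.length : Int) + ((a :: x :: t).length : Int) - 1 - 1
              = (((pre ++ [b]).length : Nat) : Int) + ((mid.length : Nat) : Int) - 1 := by
            simp [hmidlen]; ring
          rw [hl', hr', ih mid.length (by omega) mid rfl (pre ++ [b]) (a :: suf)]
          rw [htp, if_pos ha, if_pos hbo]
          simp
        · -- right even: retract right
          rw [if_pos (evenb_true hbo)]
          have hr' : (pre.length : Int) + ((a :: x :: t).length : Int) - 1 - 1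
              = (pre.length : Int) + (((a :: mid).length : Nat) : Int) - 1 := by
            simp [hmidlen]; ring
          rw [hsplitr, show (pre ++ a :: mid) ++ b :: suf = pre ++ (a :: mid) ++ (b :: suf) by simp,
            hr', ih (mid.length + 1) (by omega) (a :: mid) (by simp) pre (b :: suf)]
          rw [htp, if_pos ha, if_neg hbo]
          simp
      · -- left even: advance left
        rw [if_pos (evenb_true ha)]
        have hl' : (pre.length : Int) + 1 = (((pre ++ [a]).length : Nat) : Int) := by simp
        have hr' : (pre.length : Int) + ((a :: x :: t).length : Int) - 1
            = (((pre ++ [a]).length : Nat) : Int) + (((x :: t).length : Nat) : Int) - 1 := by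
          simp; ring
        rw [show pre ++ (a :: x :: t) ++ suf = (pre ++ [a]) ++ (x :: t) ++ suf by simp,
          hl', hr', ih (t.length + 1) (by omega) (x :: t) (by simp) (pre ++ [a]) suf]
        rw [htp, if_neg ha]
        simp

-- ===== VERDICT (by name: the statement is the Claim_ definition above) =====
theorem reverse_odds_spec : Claim_equal_reverse_odds := by
  intro arr _
  show reverse_odds arr = reverse_odds_alt arr
  rw [reverse_odds_eq_feed, ← tpSeg_eq_feed arr.length arr rfl]
  have := revOddsLoop_eq_tpSeg arr.length arr rfl [] []
  simp only [List.nil_append, List.append_nil, List.length_nil, Nat.cast_zero, zero_add] at this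
  rw [reverse_odds_alt, this]
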